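-- pv_equiv track=rewrite | github.com/lanl/minervachem | minervachem/graphlet_dags.py | group_bi_by_size
-- ===== SOURCE A (Python) =====
-- from collections import defaultdict
--
-- def group_bi_by_size(bi, reverse=True):
--     out = defaultdict(lambda: [])
--     for k, v in bi.items():
--         size, hash_ = k
--         out[size].append(k)
--
--     sizes = list(sorted((out.keys())))
--     if reverse:
--         sizes = list(reversed(sizes))
--     return sizes, dict(out)
-- ===== SOURCE B (Python) =====
-- def group_bi_by_size(bi, reverse=True):
--     keys = list(bi)
--     seen = []
--     for size, _ in keys:
--         if size not in seen:
--             seen.append(size)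
--     groups = {s: [k for k in keys if k[0] == s] for s in seen}
--     sizes = sorted(seen, reverse=reverse)
--     return sizes, groups
-- ===== Notes on version B (the rewrite author's own statement) =====
-- stated objective: alternative
-- what changed: A builds the groups in one hash pass into a defaultdict and then sorts its keys; B first collects the distinct sizes in first-seen order, builds each group with a per-size filter scan over the keys, and sorts the sizes with sorted(..., reverse=reverse) directly.
import Mathlib
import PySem

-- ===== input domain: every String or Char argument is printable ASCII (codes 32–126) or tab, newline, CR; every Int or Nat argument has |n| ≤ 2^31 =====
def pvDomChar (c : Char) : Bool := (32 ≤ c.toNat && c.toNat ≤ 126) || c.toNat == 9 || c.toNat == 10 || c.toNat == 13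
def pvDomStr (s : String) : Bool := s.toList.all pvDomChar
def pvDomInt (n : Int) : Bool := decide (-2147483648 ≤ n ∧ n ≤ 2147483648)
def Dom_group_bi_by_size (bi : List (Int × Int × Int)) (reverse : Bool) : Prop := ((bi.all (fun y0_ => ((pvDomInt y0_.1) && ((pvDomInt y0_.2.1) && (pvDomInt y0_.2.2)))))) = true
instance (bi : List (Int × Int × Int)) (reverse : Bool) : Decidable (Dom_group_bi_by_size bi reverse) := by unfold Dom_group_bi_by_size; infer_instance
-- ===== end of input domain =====

-- B collects the distinct sizes in first-seen order and then builds each group with one filter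
-- pass per size (alternative decomposition; no speed claim).


-- ===== PORT A =====
-- dict argument decoding (same first line in both ports): 'for k, v in bi.items()' iterates the
-- DISTINCT keys (size, hash) in first-occurrence order; the values are unused by both programs.
def group_bi_by_size (bi : List (Int × Int × Int)) (reverse : Bool) :
    List Int × (List (Int × List (Int × Int))) :=
  let ks : List (Int × Int) := PySem.List.dedup (bi.map (fun t => (t.1, t.2.1)))
  let out : PySem.Dict Int (List (Int × Int)) :=
    ks.foldl (fun d k => d.modify k.1 [] (fun l => l ++ [k])) PySem.Dict.empty
  let sizes := PySem.List.sorted out.keys (fun x => x) false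
  let sizes := if reverse then sizes.reverse else sizes
  (sizes, out.items)

-- ===== PORT B =====
def group_bi_by_size_alt (bi : List (Int × Int × Int)) (reverse : Bool) :
    List Int × (List (Int × List (Int × Int))) :=
  let ks : List (Int × Int) := PySem.List.dedup (bi.map (fun t => (t.1, t.2.1)))
  let seen : List Int :=
    ks.foldl (fun acc p => if acc.contains p.1 then acc else acc ++ [p.1]) []
  let groups := seen.map (fun s => (s, ks.filter (fun k => k.1 == s)))
  (PySem.List.sorted seen (fun x => x) reverse, groups)

-- ===== PRECONDITION & SPEC =====
def Spec_group_bi_by_size (bi : List (Int × Int × Int)) (reverse : Bool) (out : List Int × (List (Int × List (Int × Int)))) : Prop := out = group_bi_by_size_alt bi reverse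
instance (bi : List (Int × Int × Int)) (reverse : Bool) (out : List Int × (List (Int × List (Int × Int)))) : Decidable (Spec_group_bi_by_size bi reverse out) := by unfold Spec_group_bi_by_size; infer_instance

-- ===== CLAIM (what is proved, stated in full; the proofs are below) =====
def Claim_equal_group_bi_by_size : Prop := ∀ (bi : List (Int × Int × Int)) (reverse : Bool), Dom_group_bi_by_size bi reverse → Spec_group_bi_by_size bi reverse (group_bi_by_size bi reverse)

-- ===== LEMMAS AND PROOFS =====

-- B's seen-loop is exactly PySem.Set.ofList of the size projection.
lemma seen_eq_ofList (ks : List (Int × Int)) :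
    ks.foldl (fun acc p => if acc.contains p.1 then acc else acc ++ [p.1]) [] =
      PySem.Set.ofList (ks.map (·.1)) := by
  rw [← PySem.Set.update_nil_left, PySem.Set.update_map_eq_foldl_add]
  rfl

-- A's group for a size s is the filter B computes.
lemma getD_A_eq (ks : List (Int × Int)) (s : Int) :
    (ks.foldl (fun d k => d.modify k.1 [] (fun l => l ++ [k])) PySem.Dict.empty).getD s [] =
      ks.filter (fun k => k.1 == s) := by
  have h : ks.foldl (fun d k => d.modify k.1 [] (fun l => l ++ [k])) PySem.Dict.empty
      = (ks.map (fun k => (k.1, k))).foldl (fun d p => d.modify p.1 [] (fun l => l ++ [p.2])) PySem.Dict.empty := by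
    rw [List.foldl_map]
  rw [h, PySem.Dict.getD_foldl_modify_append]
  simp [List.filter_map, Function.comp_def]

-- A's dict keys are the distinct sizes in first-seen order.
lemma keysA_eq (ks : List (Int × Int)) :
    (ks.foldl (fun d k => d.modify k.1 [] (fun l => l ++ [k])) PySem.Dict.empty).keys =
      PySem.Set.ofList (ks.map (·.1)) := by
  rw [PySem.Dict.keys_foldl_modify_key]
  simp [PySem.Set.update_nil_left]

-- A's dict items list equals B's groups list.
lemma itemsA_eq (ks : List (Int × Int)) :
    (ks.foldl (fun d k => d.modify k.1 [] (fun l => l ++ [k])) PySem.Dict.empty).items =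
      (PySem.Set.ofList (ks.map (·.1))).map (fun s => (s, ks.filter (fun k => k.1 == s))) := by
  have hnd : (ks.foldl (fun d k => d.modify k.1 [] (fun l => l ++ [k])) PySem.Dict.empty).keys.Nodup := by
    apply PySem.Dict.nodup_keys_foldl_modify_key
    simp
  rw [PySem.Dict.items_eq_map_keys _ hnd [], keysA_eq]
  refine List.map_congr_left ?_
  intro s _
  rw [getD_A_eq]

-- sorted(xs, reverse=True) of a duplicate-free list is the reverse of sorted(xs).
lemma sorted_rev_eq_reverse_sorted (xs : List Int) (h : xs.Nodup) :
    PySem.List.sorted xs (fun x => x) true = (PySem.List.sorted xs (fun x => x) false).reverse := by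
  apply PySem.List.sorted_rev_eq_of_perm_of_pairwise_gt
  · exact (List.reverse_perm _).trans (PySem.List.sorted_perm xs _ _)
  · rw [List.pairwise_reverse]
    have hp := PySem.List.sorted_pairwise xs (fun x => x)
    have hn : (PySem.List.sorted xs (fun x => x) false).Nodup :=
      ((PySem.List.sorted_perm xs _ _).nodup_iff).mpr h
    refine (hp.and hn).imp ?_
    rintro a b ⟨hle, hne⟩
    exact lt_of_le_of_ne hle hne

-- ===== VERDICT (by name: the statement is the Claim_ definition above) =====
theorem group_bi_by_size_spec : Claim_equal_group_bi_by_size := by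
  intro bi reverse _
  unfold Spec_group_bi_by_size group_bi_by_size group_bi_by_size_alt
  simp only [seen_eq_ofList, keysA_eq, itemsA_eq]
  refine Prod.ext ?_ rfl
  cases reverse
  · rfl
  · simp only [if_true]
    exact (sorted_rev_eq_reverse_sorted _ (PySem.Set.nodup_ofList _)).symm
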